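-- pv_equiv track=rewrite | github.com/dbsrl1026/boj-solve | 2108.py | choiBin
-- ===== SOURCE A (Python) =====
-- def choiBin(arr,n):
--
--     dic = {}
--     for i,v in enumerate(arr):
--         if v in dic:
--             dic[v] += 1
--         else:
--             dic[v] = 1
--     maxvalue = max(dic.values())
--     arrr = []
--     for k,v in dic.items():
--         if v == maxvalue:
--             arrr.append(k)
--     if len(arrr) == 1:
--         return arrr[0]
--     else:
--         arrr = sorted(arrr)
--         return arrr[1]
-- ===== SOURCE B (Python) =====
-- def choiBin(arr, n):
--     # sort once, then one pass over runs of equal values (ascending order)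
--     s = sorted(arr)
--     best = []      # values whose run length equals the best count, ascending
--     bestc = 0
--     i = 0
--     while i < len(s):
--         j = i
--         while j < len(s) and s[j] == s[i]:
--             j += 1
--         c = j - i
--         if c > bestc:
--             bestc = c
--             best = [s[i]]
--         elif c == bestc:
--             best.append(s[i])
--         i = j
--     if len(best) == 1:
--         return best[0]
--     return best[1]
-- ===== Notes on version B (the rewrite author's own statement) =====
-- stated objective: alternative
-- what changed: Replaces the dict-counting pass plus filter plus conditional sort with a single sort followed by one grouping pass over runs of equal values, collecting the max-count values already in ascending order.
import Mathlib
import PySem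

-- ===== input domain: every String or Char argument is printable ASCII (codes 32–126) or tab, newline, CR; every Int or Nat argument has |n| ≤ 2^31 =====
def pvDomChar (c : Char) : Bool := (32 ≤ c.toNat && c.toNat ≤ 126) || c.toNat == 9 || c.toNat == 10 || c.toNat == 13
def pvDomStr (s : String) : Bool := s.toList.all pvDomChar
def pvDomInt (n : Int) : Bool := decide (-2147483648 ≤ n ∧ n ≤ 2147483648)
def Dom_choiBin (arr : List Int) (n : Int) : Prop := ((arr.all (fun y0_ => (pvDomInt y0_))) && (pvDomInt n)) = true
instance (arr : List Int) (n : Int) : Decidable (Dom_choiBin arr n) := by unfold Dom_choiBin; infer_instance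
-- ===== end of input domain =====

-- B replaces A's dict-count + filter + conditional sort with sort-then-group-runs; same return value on nonempty input.

-- ===== PORT A =====
def choiBin (arr : List Int) (n : Int) : Int :=
  let dic := (PySem.List.enumerate arr 0).foldl
    (fun d p => if d.contains p.2 then d.insert p.2 (d.getD p.2 0 + 1) else d.insert p.2 1)
    (PySem.Dict.empty : PySem.Dict Int Int)
  -- max() of an empty sequence raises ValueError: excluded by Pre_ (arr ≠ [])
  let maxvalue := (PySem.List.max? dic.values (fun v => v)).getD 0
  let arrr := dic.items.foldl (fun acc p => if p.2 == maxvalue then acc ++ [p.1] else acc) []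
  if arrr.length == 1 then
    (PySem.List.pyGet? arrr 0).getD 0
  else
    let arrr2 := PySem.List.sorted arrr (fun x => x) false
    (PySem.List.pyGet? arrr2 1).getD 0

-- ===== PORT B =====
-- the outer while loop of Source B: remaining sorted suffix, current best count, best values
def bScan : List Int → Int → List Int → List Int
  | [], _, best => best
  | x :: rest, bestc, best =>
      let c : Int := (rest.takeWhile (· == x)).length + 1
      let rest' := rest.dropWhile (· == x)
      if c > bestc then bScan rest' c [x]
      else if c == bestc then bScan rest' bestc (best ++ [x])
      else bScan rest' bestc best
  termination_by s _ _ => s.length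
  decreasing_by
    all_goals
      simp only [List.length_cons]
      exact Nat.lt_succ_of_le (List.length_dropWhile_le _ _)

def choiBin_alt (arr : List Int) (n : Int) : Int :=
  let s := PySem.List.sorted arr (fun x => x) false
  let best := bScan s 0 []
  if best.length == 1 then (PySem.List.pyGet? best 0).getD 0
  else (PySem.List.pyGet? best 1).getD 0

-- ===== PRECONDITION & SPEC =====
-- A raises ValueError (max() of empty dict values) on arr = []; excluded.
def Pre_choiBin (arr : List Int) (n : Int) : Prop := arr ≠ []
instance (arr : List Int) (n : Int) : Decidable (Pre_choiBin arr n) := by unfold Pre_choiBin; infer_instance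
def pvWitness_choiBin : List Int × Int := ([1, 2, 2], 3)
def Spec_choiBin (arr : List Int) (n : Int) (out : Int) : Prop := out = choiBin_alt arr n
instance (arr : List Int) (n : Int) (out : Int) : Decidable (Spec_choiBin arr n out) := by unfold Spec_choiBin; infer_instance

-- ===== CLAIM (what is proved, stated in full; the proofs are below) =====
def Claim_equal_choiBin : Prop := ∀ (arr : List Int) (n : Int), Dom_choiBin arr n → Pre_choiBin arr n → Spec_choiBin arr n (choiBin arr n)

-- ===== LEMMAS AND PROOFS =====

-- distinct values of a sorted list, in ascending order (one per run)
def runsVals : List Int → List Int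
  | [] => []
  | x :: rest => x :: runsVals (rest.dropWhile (· == x))
  termination_by s => s.length
  decreasing_by
    simp only [List.length_cons]
    exact Nat.lt_succ_of_le (List.length_dropWhile_le _ _)

-- running max of bc and the counts of the distinct values of s
def mxOf (s : List Int) (bc : Int) : Int :=
  (runsVals s).foldl (fun m v => max m ((s.count v : Int))) bc

lemma drop_gt {x : Int} {rest : List Int} (hp : rest.Pairwise (· ≤ ·))
    (hle : ∀ y ∈ rest, x ≤ y) : ∀ y ∈ rest.dropWhile (· == x), x < y := by
  induction rest with
  | nil => simp
  | cons a rs ih =>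
    by_cases hax : a = x
    · subst hax
      simp only [List.dropWhile_cons, BEq.rfl, if_pos]
      exact ih hp.tail (fun y hy => hle y (List.mem_cons_of_mem a hy))
    · rw [List.dropWhile_cons_of_neg (by simp [hax])]
      intro y hy
      rcases List.mem_cons.mp hy with h | h
      · subst h; exact lt_of_le_of_ne (hle y (List.mem_cons_self)) (Ne.symm hax)
      · exact lt_of_lt_of_le (lt_of_le_of_ne (hle a List.mem_cons_self) (Ne.symm hax))
          ((List.pairwise_cons.mp hp).1 y h)

lemma takeWhile_eq_x {x : Int} (rest : List Int) :
    ∀ y ∈ rest.takeWhile (· == x), y = x := by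
  intro y hy
  have := List.mem_takeWhile_imp hy
  simpa using this

lemma count_cons_self_sorted {x : Int} {rest : List Int}
    (hs : (x :: rest).Pairwise (· ≤ ·)) :
    (x :: rest).count x = (rest.takeWhile (· == x)).length + 1 := by
  have hle : ∀ y ∈ rest, x ≤ y := (List.pairwise_cons.mp hs).1
  rw [List.count_cons_self]
  conv_lhs => rw [← List.takeWhile_append_dropWhile (p := (· == x)) (l := rest)]
  rw [List.count_append]
  have h1 : (rest.takeWhile (· == x)).count x = (rest.takeWhile (· == x)).length :=
    List.count_eq_length.mpr (fun y hy => (takeWhile_eq_x rest y hy).symm)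
  have h2 : (rest.dropWhile (· == x)).count x = 0 :=
    List.count_eq_zero.mpr (fun hmem => lt_irrefl x (drop_gt hs.tail hle x hmem))
  omega

lemma count_cons_ne_sorted {x v : Int} {rest : List Int} (hv : v ≠ x) :
    (x :: rest).count v = (rest.dropWhile (· == x)).count v := by
  rw [List.count_cons, if_neg (by simpa using hv.symm)]
  conv_lhs => rw [← List.takeWhile_append_dropWhile (p := (· == x)) (l := rest)]
  rw [List.count_append]
  have h1 : (rest.takeWhile (· == x)).count v = 0 :=
    List.count_eq_zero.mpr (fun hmem => hv (takeWhile_eq_x rest v hmem))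
  omega

lemma pairwise_drop {x : Int} {rest : List Int} (hp : rest.Pairwise (· ≤ ·)) :
    (rest.dropWhile (· == x)).Pairwise (· ≤ ·) :=
  hp.sublist (List.dropWhile_sublist _)

lemma mem_runsVals {s : List Int} (hs : s.Pairwise (· ≤ ·)) {v : Int} :
    v ∈ runsVals s ↔ v ∈ s := by
  induction s using runsVals.induct with
  | case1 => simp [runsVals]
  | case2 x rest ih =>
    have hle : ∀ y ∈ rest, x ≤ y := (List.pairwise_cons.mp hs).1
    rw [runsVals]
    simp only [List.mem_cons]
    rw [ih (pairwise_drop hs.tail)]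
    constructor
    · rintro (h | h)
      · exact Or.inl h
      · exact Or.inr ((List.dropWhile_sublist _).subset h)
    · rintro (h | h)
      · exact Or.inl h
      · by_cases hvx : v = x
        · exact Or.inl hvx
        · refine Or.inr ?_
          conv at h => rw [← List.takeWhile_append_dropWhile (p := (· == x)) (l := rest)]
          rcases List.mem_append.mp h with h' | h'
          · exact absurd (takeWhile_eq_x rest v h') hvx
          · exact h'

lemma pairwise_runsVals {s : List Int} (hs : s.Pairwise (· ≤ ·)) :
    (runsVals s).Pairwise (· < ·) := by
  induction s using runsVals.induct with
  | case1 => simp [runsVals]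
  | case2 x rest ih =>
    have hle : ∀ y ∈ rest, x ≤ y := (List.pairwise_cons.mp hs).1
    rw [runsVals]
    refine List.pairwise_cons.mpr ⟨?_, ih (pairwise_drop hs.tail)⟩
    intro v hv
    exact drop_gt hs.tail hle v
      ((mem_runsVals (pairwise_drop hs.tail)).mp hv)

lemma mxOf_cons {x : Int} {rest : List Int} (hs : (x :: rest).Pairwise (· ≤ ·)) (bc : Int) :
    mxOf (x :: rest) bc
      = mxOf (rest.dropWhile (· == x)) (max bc (((x :: rest).count x : Int))) := by
  have hle : ∀ y ∈ rest, x ≤ y := (List.pairwise_cons.mp hs).1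
  unfold mxOf
  rw [runsVals]
  simp only [List.foldl_cons]
  apply PySem.List.foldl_congr_mem
  intro acc v hv
  have hvr : v ∈ rest.dropWhile (· == x) :=
    (mem_runsVals (pairwise_drop hs.tail)).mp hv
  have hvx : v ≠ x := ne_of_gt (drop_gt hs.tail hle v hvr)
  rw [count_cons_ne_sorted hvx]

lemma le_mxOf (s : List Int) (bc : Int) : bc ≤ mxOf s bc :=
  (PySem.List.le_foldl_max_int (runsVals s) _ bc).1

lemma count_le_mxOf {s : List Int} (hs : s.Pairwise (· ≤ ·)) (bc : Int) :
    ∀ v ∈ s, (s.count v : Int) ≤ mxOf s bc := by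
  intro v hv
  exact (PySem.List.le_foldl_max_int (runsVals s) _ bc).2 v ((mem_runsVals hs).mpr hv)

lemma mxOf_attained {s : List Int} (hs : s.Pairwise (· ≤ ·)) (bc : Int) :
    mxOf s bc = bc ∨ ∃ v ∈ s, mxOf s bc = (s.count v : Int) := by
  unfold mxOf
  rw [← List.foldl_map]
  rcases PySem.List.foldl_max_mem ((runsVals s).map (fun v => (s.count v : Int))) bc with h | h
  · exact Or.inl h
  · rcases List.mem_map.mp h with ⟨v, hv, hveq⟩
    exact Or.inr ⟨v, (mem_runsVals hs).mp hv, hveq.symm⟩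

lemma bScan_eq : ∀ (s : List Int) (bc : Int) (best : List Int), s.Pairwise (· ≤ ·) →
    bScan s bc best
      = (if mxOf s bc = bc then best else [])
        ++ (runsVals s).filter (fun v => ((s.count v : Int) == mxOf s bc)) := by
  intro s bc best
  induction s, bc, best using bScan.induct with
  | case1 bc best => intro _; simp [bScan, runsVals, mxOf]
  | case2 x rest bc best c rest' hgt ih =>
    intro hs
    have hr' : rest'.Pairwise (· ≤ ·) := pairwise_drop hs.tail
    have hle : ∀ y ∈ rest, x ≤ y := (List.pairwise_cons.mp hs).1
    have hcx : (((x :: rest).count x : Int)) = c := by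
      show _ = ((rest.takeWhile (· == x)).length : Int) + 1
      rw [count_cons_self_sorted hs]; push_cast; ring
    have hmx : mxOf (x :: rest) bc = mxOf rest' c := by
      rw [mxOf_cons hs bc, hcx, max_eq_right (le_of_lt hgt)]
    have hcle : c ≤ mxOf rest' c := le_mxOf _ _
    have hfc : (runsVals rest').filter (fun v => (((x :: rest).count v : Int) == mxOf rest' c))
        = (runsVals rest').filter (fun v => ((rest'.count v : Int) == mxOf rest' c)) :=
      List.filter_congr (fun v hv => by
        have hvx : v ≠ x := ne_of_gt (drop_gt hs.tail hle v ((mem_runsVals hr').mp hv))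
        rw [count_cons_ne_sorted hvx])
    rw [bScan, if_pos hgt, ih hr', runsVals, List.filter_cons, hmx, hfc,
      if_neg (show ¬ mxOf rest' c = bc by omega), hcx]
    by_cases h : c = mxOf rest' c
    · rw [if_pos h.symm, if_pos (beq_iff_eq.mpr h)]
      simp
    · rw [if_neg (fun hh => h hh.symm), if_neg (by simpa using h)]
  | case3 x rest bc best c rest' hng heq ih =>
    intro hs
    have hr' : rest'.Pairwise (· ≤ ·) := pairwise_drop hs.tail
    have hle : ∀ y ∈ rest, x ≤ y := (List.pairwise_cons.mp hs).1
    have heq' : c = bc := beq_iff_eq.mp heq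
    have hcx : (((x :: rest).count x : Int)) = c := by
      show _ = ((rest.takeWhile (· == x)).length : Int) + 1
      rw [count_cons_self_sorted hs]; push_cast; ring
    have hmx : mxOf (x :: rest) bc = mxOf rest' bc := by
      rw [mxOf_cons hs bc, hcx, heq', max_self]
    have hfc : (runsVals rest').filter (fun v => (((x :: rest).count v : Int) == mxOf rest' bc))
        = (runsVals rest').filter (fun v => ((rest'.count v : Int) == mxOf rest' bc)) :=
      List.filter_congr (fun v hv => by
        have hvx : v ≠ x := ne_of_gt (drop_gt hs.tail hle v ((mem_runsVals hr').mp hv))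
        rw [count_cons_ne_sorted hvx])
    rw [bScan, if_neg hng, if_pos heq, ih hr', runsVals, List.filter_cons, hmx, hfc, hcx, heq']
    by_cases h : mxOf rest' bc = bc
    · rw [if_pos h, if_pos h, if_pos (beq_iff_eq.mpr h.symm)]
      simp
    · rw [if_neg h, if_neg h, if_neg (by simpa using fun hh => h hh.symm)]
  | case4 x rest bc best c rest' hng hne ih =>
    intro hs
    have hr' : rest'.Pairwise (· ≤ ·) := pairwise_drop hs.tail
    have hle : ∀ y ∈ rest, x ≤ y := (List.pairwise_cons.mp hs).1
    have hne' : c ≠ bc := fun h => hne (beq_iff_eq.mpr h)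
    have hlt : c < bc := by omega
    have hcx : (((x :: rest).count x : Int)) = c := by
      show _ = ((rest.takeWhile (· == x)).length : Int) + 1
      rw [count_cons_self_sorted hs]; push_cast; ring
    have hmx : mxOf (x :: rest) bc = mxOf rest' bc := by
      rw [mxOf_cons hs bc, hcx, max_eq_left (le_of_lt hlt)]
    have hble : bc ≤ mxOf rest' bc := le_mxOf _ _
    have hfc : (runsVals rest').filter (fun v => (((x :: rest).count v : Int) == mxOf rest' bc))
        = (runsVals rest').filter (fun v => ((rest'.count v : Int) == mxOf rest' bc)) :=
      List.filter_congr (fun v hv => by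
        have hvx : v ≠ x := ne_of_gt (drop_gt hs.tail hle v ((mem_runsVals hr').mp hv))
        rw [count_cons_ne_sorted hvx])
    rw [bScan, if_neg hng, if_neg hne, ih hr', runsVals, List.filter_cons, hmx, hfc, hcx,
      if_neg (show ¬ (c == mxOf rest' bc) = true by simp; omega)]

lemma enumerate_foldl_snd {α β : Type} (xs : List α) (g : β → α → β) :
    ∀ (st : Int) (init : β),
      (PySem.List.enumerate xs st).foldl (fun d p => g d p.2) init = xs.foldl g init := by
  induction xs with
  | nil => intro st init; simp [PySem.List.enumerate_nil]
  | cons x t ih => intro st init; simp [PySem.List.enumerate_cons, ih]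

lemma dic_eq (arr : List Int) :
    (PySem.List.enumerate arr 0).foldl
      (fun d p => if d.contains p.2 then d.insert p.2 (d.getD p.2 0 + 1) else d.insert p.2 1)
      (PySem.Dict.empty : PySem.Dict Int Int) = PySem.Dict.counter arr := by
  have h2 : arr.foldl
      (fun d x => if d.contains x then d.insert x (d.getD x 0 + 1) else d.insert x 1)
      PySem.Dict.empty = PySem.Dict.counter arr := by
    rw [← PySem.Dict.foldl_insert_getD_add_one_eq_counter]
    apply PySem.List.foldl_congr_mem
    intro d x _
    by_cases h : d.contains x
    · simp [h]
    · rw [PySem.Dict.getD_of_not_contains (h := by simpa using h)]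
      simp [h]
  exact (enumerate_foldl_snd arr
    (fun d x => if d.contains x then d.insert x (d.getD x 0 + 1) else d.insert x 1) 0
    (PySem.Dict.empty : PySem.Dict Int Int)).trans h2

lemma main_eq (arr : List Int) (n : Int) (hpre : arr ≠ []) :
    choiBin arr n = choiBin_alt arr n := by
  -- notation
  have hsp : (PySem.List.sorted arr (fun x => x) false).Pairwise (· ≤ ·) := by
    have := PySem.List.sorted_pairwise (xs := arr) (key := fun x : Int => x)
    simpa using this
  have hperm : (PySem.List.sorted arr (fun x => x) false).Perm arr :=
    PySem.List.sorted_perm arr _ _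
  have hcnt : ∀ v : Int, (PySem.List.sorted arr (fun x => x) false).count v = arr.count v :=
    fun v => hperm.count_eq v
  obtain ⟨a0, ha0⟩ : ∃ a, a ∈ arr := List.exists_mem_of_ne_nil arr hpre
  have ha0S : a0 ∈ PySem.Set.ofList arr := (PySem.Set.mem_ofList _ _).mpr ha0
  -- the max value A computes
  obtain ⟨m, hm⟩ : ∃ m, PySem.List.max?
      ((PySem.Set.ofList arr).map (fun k => (arr.count k : Int))) (fun v => v) = some m := by
    cases h : PySem.List.max?
        ((PySem.Set.ofList arr).map (fun k => (arr.count k : Int))) (fun v => v) with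
    | some m => exact ⟨m, rfl⟩
    | none =>
      exfalso
      have := (PySem.List.max?_eq_none_iff _ _).mp h
      exact (List.ne_nil_of_mem (List.mem_map_of_mem (f := fun k => (arr.count k : Int)) ha0S)) this
  have hub : ∀ v ∈ arr, (arr.count v : Int) ≤ m := by
    intro v hv
    have := PySem.List.max?_isMax hm ((arr.count v : Int))
      (List.mem_map_of_mem ((PySem.Set.mem_ofList _ _).mpr hv))
    simpa using this
  obtain ⟨w0, hw0, hw0eq⟩ : ∃ w ∈ arr, m = (arr.count w : Int) := by
    have := PySem.List.max?_mem hm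
    rcases List.mem_map.mp this with ⟨w, hw, hweq⟩
    exact ⟨w, (PySem.Set.mem_ofList _ _).mp hw, hweq.symm⟩
  -- m is also the B-side running max
  have hm1 : 1 ≤ m := by
    have h1 : 0 < arr.count w0 := List.count_pos_iff.mpr hw0
    omega
  have h0 : mxOf (PySem.List.sorted arr (fun x => x) false) 0 = m := by
    rcases mxOf_attained hsp 0 with h | ⟨w, hw, hweq⟩
    · exfalso
      have hmem : a0 ∈ PySem.List.sorted arr (fun x => x) false := hperm.mem_iff.mpr ha0
      have h1 : 0 < (PySem.List.sorted arr (fun x => x) false).count a0 :=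
        List.count_pos_iff.mpr hmem
      have h2 := count_le_mxOf hsp 0 a0 hmem
      omega
    · have h1 : m ≤ mxOf (PySem.List.sorted arr (fun x => x) false) 0 := by
        have := count_le_mxOf hsp 0 w0 (hperm.mem_iff.mpr hw0)
        rw [hcnt w0] at this
        omega
      have h2 : mxOf (PySem.List.sorted arr (fun x => x) false) 0 ≤ m := by
        rw [hweq, hcnt w]
        exact hub w (hperm.mem_iff.mp hw)
      omega
  -- the two candidate lists
  have hbest : bScan (PySem.List.sorted arr (fun x => x) false) 0 []
      = (runsVals (PySem.List.sorted arr (fun x => x) false)).filter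
          (fun v => ((arr.count v : Int) == m)) := by
    rw [bScan_eq _ 0 [] hsp, if_neg (by omega), List.nil_append]
    exact List.filter_congr (fun v hv => by rw [hcnt v, h0])
  have hnodupB : ((runsVals (PySem.List.sorted arr (fun x => x) false)).filter
      (fun v => ((arr.count v : Int) == m))).Nodup :=
    ((pairwise_runsVals hsp).imp (fun h => ne_of_lt h)).filter _
  have hpwB : ((runsVals (PySem.List.sorted arr (fun x => x) false)).filter
      (fun v => ((arr.count v : Int) == m))).Pairwise (· < ·) :=
    (pairwise_runsVals hsp).filter _
  have hnodupA : ((PySem.Set.ofList arr).filter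
      (fun v => ((arr.count v : Int) == m))).Nodup :=
    (PySem.Set.nodup_ofList arr).filter _
  have hpermAB : ((runsVals (PySem.List.sorted arr (fun x => x) false)).filter
      (fun v => ((arr.count v : Int) == m))).Perm
      ((PySem.Set.ofList arr).filter (fun v => ((arr.count v : Int) == m))) := by
    rw [List.perm_ext_iff_of_nodup hnodupB hnodupA]
    intro v
    rw [List.mem_filter, List.mem_filter, mem_runsVals hsp, PySem.Set.mem_ofList _ _,
      hperm.mem_iff]
  have hsortedA : PySem.List.sorted
      ((PySem.Set.ofList arr).filter (fun v => ((arr.count v : Int) == m)))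
      (fun x => x) false
      = (runsVals (PySem.List.sorted arr (fun x => x) false)).filter
          (fun v => ((arr.count v : Int) == m)) :=
    PySem.List.sorted_eq_of_perm_of_pairwise_lt _ _ _ hpermAB (by simpa using hpwB)
  have hlen := hpermAB.length_eq
  -- unfold both ports
  have hmv : ((PySem.List.max? (PySem.Dict.counter arr).values (fun v => v)).getD 0) = m := by
    have hv : (PySem.Dict.counter arr).values
        = (PySem.Set.ofList arr).map (fun k => (arr.count k : Int)) := by
      show (PySem.Dict.counter arr).items.map (·.2) = _
      rw [PySem.Dict.items_counter]
      simp [List.map_map, Function.comp]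
    rw [hv, hm]
    rfl
  have harrr : (PySem.Dict.counter arr).items.foldl
      (fun acc p => if p.2 == m then acc ++ [p.1] else acc) []
      = (PySem.Set.ofList arr).filter (fun v => ((arr.count v : Int) == m)) := by
    rw [PySem.List.foldl_append_if (l := (PySem.Dict.counter arr).items)
      (p := fun p => p.2 == m) (f := fun p => p.1) (acc := [])]
    rw [PySem.Dict.items_counter, List.filter_map, List.map_map, List.nil_append]
    simp only [Function.comp_def]
    exact List.map_id _
  show
    (if ((((PySem.List.enumerate arr 0).foldl
      (fun d p => if d.contains p.2 then d.insert p.2 (d.getD p.2 0 + 1) else d.insert p.2 1)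
      (PySem.Dict.empty : PySem.Dict Int Int)).items.foldl
        (fun acc p => if p.2 == ((PySem.List.max?
          ((PySem.List.enumerate arr 0).foldl
            (fun d p => if d.contains p.2 then d.insert p.2 (d.getD p.2 0 + 1) else d.insert p.2 1)
            (PySem.Dict.empty : PySem.Dict Int Int)).values (fun v => v)).getD 0) then acc ++ [p.1] else acc) []).length == 1)
    then (PySem.List.pyGet? (((PySem.List.enumerate arr 0).foldl
      (fun d p => if d.contains p.2 then d.insert p.2 (d.getD p.2 0 + 1) else d.insert p.2 1)
      (PySem.Dict.empty : PySem.Dict Int Int)).items.foldl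
        (fun acc p => if p.2 == ((PySem.List.max?
          ((PySem.List.enumerate arr 0).foldl
            (fun d p => if d.contains p.2 then d.insert p.2 (d.getD p.2 0 + 1) else d.insert p.2 1)
            (PySem.Dict.empty : PySem.Dict Int Int)).values (fun v => v)).getD 0) then acc ++ [p.1] else acc) []) 0).getD 0
    else (PySem.List.pyGet? (PySem.List.sorted (((PySem.List.enumerate arr 0).foldl
      (fun d p => if d.contains p.2 then d.insert p.2 (d.getD p.2 0 + 1) else d.insert p.2 1)
      (PySem.Dict.empty : PySem.Dict Int Int)).items.foldl
        (fun acc p => if p.2 == ((PySem.List.max?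
          ((PySem.List.enumerate arr 0).foldl
            (fun d p => if d.contains p.2 then d.insert p.2 (d.getD p.2 0 + 1) else d.insert p.2 1)
            (PySem.Dict.empty : PySem.Dict Int Int)).values (fun v => v)).getD 0) then acc ++ [p.1] else acc) [])
      (fun x => x) false) 1).getD 0)
    =
    (if ((bScan (PySem.List.sorted arr (fun x => x) false) 0 []).length == 1)
    then (PySem.List.pyGet? (bScan (PySem.List.sorted arr (fun x => x) false) 0 []) 0).getD 0
    else (PySem.List.pyGet? (bScan (PySem.List.sorted arr (fun x => x) false) 0 []) 1).getD 0)
  rw [dic_eq arr, hmv, harrr, hbest]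
  rw [← hlen]
  by_cases hl : ((((runsVals (PySem.List.sorted arr (fun x => x) false)).filter
      (fun v => ((arr.count v : Int) == m))).length == 1) = true)
  · rw [if_pos hl, if_pos hl]
    obtain ⟨a, ha⟩ := List.length_eq_one_iff.mp (by rw [← hlen]; simpa using hl)
    obtain ⟨b, hb⟩ := List.length_eq_one_iff.mp (by simpa using hl)
    rw [ha, hb]
    have : b = a := by
      have h := hpermAB
      rw [ha, hb] at h
      simpa using h.mem_iff.mp (List.mem_singleton_self b)
    rw [this]
  · rw [if_neg hl, if_neg hl, hsortedA]
-- ===== VERDICT (by name: the statement is the Claim_ definition above) =====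
theorem choiBin_spec : Claim_equal_choiBin := by
  intro arr n _ hpre
  show choiBin arr n = choiBin_alt arr n
  exact main_eq arr n hpre
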